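-- pv_equiv track=rewrite | github.com/zlf111/github-semantic-search | scripts/core/scorer.py | _build_containment_filter
-- ===== SOURCE A (Python) =====
-- def _build_containment_filter(keywords_lower: list[str]) -> set[str]:
--     """Build set of short keywords that are substrings of longer ones."""
--     suppressed = set()
--     sorted_kws = sorted(keywords_lower, key=len, reverse=True)
--     for i, long_kw in enumerate(sorted_kws):
--         for short_kw in sorted_kws[i + 1:]:
--             if short_kw != long_kw and short_kw in long_kw:
--                 suppressed.add(short_kw)
--     return suppressed
-- ===== SOURCE B (Python) =====
-- def _build_containment_filter(keywords_lower):
--     """Build set of short keywords that are substrings of longer ones.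
--
--     Worklist algorithm: keep a dict of the distinct keywords still undecided;
--     for each keyword (longest first) move every remaining strictly-shorter
--     candidate contained in it to the suppressed set and delete it from the
--     worklist, so each distinct candidate is tested only until its first
--     container is found."""
--     by_len = sorted(keywords_lower, key=len, reverse=True)
--     remaining = dict.fromkeys(by_len)
--     suppressed = set()
--     for t in by_len:
--         for s in list(remaining):
--             if len(s) < len(t) and s in t:
--                 suppressed.add(s)
--                 del remaining[s]
--     return suppressed
-- ===== Notes on version B (the rewrite author's own statement) =====
-- stated objective: alternative
-- what changed: B replaces A's all-pairs scan over tail slices of the sorted list by a shrinking worklist: the distinct keywords live in a dict, and each keyword in length order deletes from the worklist every remaining strictly-shorter candidate it contains, so every distinct candidate is tested only until its first container is found and duplicates are never re-tested.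
import Mathlib
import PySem

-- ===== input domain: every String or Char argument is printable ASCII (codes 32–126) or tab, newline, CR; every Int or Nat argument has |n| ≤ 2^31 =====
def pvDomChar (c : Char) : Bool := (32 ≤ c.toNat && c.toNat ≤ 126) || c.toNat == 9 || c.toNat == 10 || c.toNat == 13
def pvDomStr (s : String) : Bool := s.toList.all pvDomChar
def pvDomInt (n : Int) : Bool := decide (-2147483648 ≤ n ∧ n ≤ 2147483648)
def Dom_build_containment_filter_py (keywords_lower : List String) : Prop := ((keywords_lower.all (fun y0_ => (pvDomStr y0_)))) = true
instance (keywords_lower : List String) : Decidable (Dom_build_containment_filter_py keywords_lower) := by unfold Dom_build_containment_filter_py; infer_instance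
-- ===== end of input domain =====

-- B replaces A's all-pairs scan over tail slices by a shrinking worklist of the distinct
-- keywords: each keyword in length order deletes from the worklist every remaining
-- strictly-shorter candidate it contains, so each distinct candidate is tested only until
-- its first container is found (objective: alternative algorithm, same worst-case cost).

-- ===== PORT A =====
def build_containment_filter_py (keywords_lower : List String) : List String :=
  let sorted_kws := PySem.List.sorted keywords_lower (fun s => PySem.Str.len s) true
  (PySem.List.enumerate sorted_kws).foldl
    (fun suppressed p =>
      (PySem.List.slice sorted_kws (some (p.1 + 1)) none).foldl
        (fun suppressed short_kw =>
          if (short_kw != p.2) && PySem.Str.isIn short_kw p.2 then PySem.Set.add suppressed short_kw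
          else suppressed)
        suppressed)
    PySem.Set.empty

-- ===== PORT B =====
def build_containment_filter_py_alt (keywords_lower : List String) : List String :=
  let by_len := PySem.List.sorted keywords_lower (fun s => PySem.Str.len s) true
  let remaining := PySem.List.dedup by_len
  (by_len.foldl
    (fun (st : List String × PySem.Set String) t =>
      st.1.foldl
        (fun (st2 : List String × PySem.Set String) s =>
          if decide (PySem.Str.len s < PySem.Str.len t) && PySem.Str.isIn s t then
            (st2.1.filter (fun x => x != s), PySem.Set.add st2.2 s)
          else st2)
        st)
    (remaining, PySem.Set.empty)).2

-- ===== PRECONDITION & SPEC =====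
def Spec_build_containment_filter_py (keywords_lower : List String) (out : List String) : Prop := out = build_containment_filter_py_alt keywords_lower
instance (keywords_lower : List String) (out : List String) : Decidable (Spec_build_containment_filter_py keywords_lower out) := by unfold Spec_build_containment_filter_py; infer_instance

-- ===== CLAIM (what is proved, stated in full; the proofs are below) =====
def Claim_equal_build_containment_filter_py : Prop := ∀ (keywords_lower : List String), Dom_build_containment_filter_py keywords_lower → Spec_build_containment_filter_py keywords_lower (build_containment_filter_py keywords_lower)

-- ===== LEMMAS AND PROOFS =====

-- A's emission sequence: for each head, the later keywords that are proper substrings of it.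
def pvFlatA : List String → List String
  | [] => []
  | t :: rest => rest.filter (fun s => (s != t) && PySem.Str.isIn s t) ++ pvFlatA rest

-- B's inner-loop predicate: strictly shorter and contained.
def pvP (s t : String) : Bool := decide (PySem.Str.len s < PySem.Str.len t) && PySem.Str.isIn s t

-- B's outer loop, worklist form: state = suppressed set, R = remaining candidates.
def pvOuter : List String → List String → PySem.Set String → PySem.Set String
  | [], _, S => S
  | t :: M, R, S => pvOuter M (R.filter (fun s => !(pvP s t))) (PySem.Set.update S (R.filter (fun s => pvP s t)))

-- B's remaining-worklist after processing a list of containers.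
def pvRem : List String → List String → List String
  | [], R => R
  | t :: M, R => pvRem M (R.filter (fun s => !(pvP s t)))

-- inner loop of A = Set.update with the filtered candidates
theorem pv_foldl_if_add {α : Type} [BEq α] (p : α → Bool) :
    ∀ (xs : List α) (st : PySem.Set α),
      xs.foldl (fun st s => if p s then PySem.Set.add st s else st) st
        = PySem.Set.update st (xs.filter p) := by
  intro xs
  induction xs with
  | nil => intro st; rfl
  | cons x xs ih =>
    intro st
    cases h : p x <;>
      simp [List.foldl_cons, h, PySem.Set.update_cons, ih]

theorem pv_ofList_cons (x : String) (xs : List String) :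
    PySem.Set.ofList (x :: xs) = x :: (PySem.Set.ofList xs).filter (fun y => y != x) := by
  have h1 : PySem.Set.ofList (x :: xs) = PySem.Set.update [x] xs := rfl
  rw [h1, PySem.Set.update_eq_append_filter]
  simp only [List.cons_append, List.nil_append]
  congr 1
  apply List.filter_congr
  intro y _
  by_cases hyx : y = x <;> simp [hyx]

theorem pv_dedup_filter (p : String → Bool) :
    ∀ xs : List String,
      PySem.List.dedup (xs.filter p) = (PySem.List.dedup xs).filter p := by
  intro xs
  induction xs with
  | nil => rfl
  | cons x xs ih =>
    simp only [PySem.List.dedup_eq_ofList] at *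
    cases h : p x
    · rw [List.filter_cons_of_neg (by simp [h]), ih, pv_ofList_cons, List.filter_cons_of_neg (by simp [h]),
        List.filter_filter]
      apply List.filter_congr
      intro a _
      by_cases hax : a = x
      · subst hax; simp [h]
      · simp [bne, hax]
    · rw [List.filter_cons_of_pos (by simp [h]), pv_ofList_cons, pv_ofList_cons, ih,
        List.filter_cons_of_pos (by simp [h]), List.filter_filter, List.filter_filter]
      congr 1
      apply List.filter_congr
      intro a _
      exact Bool.and_comm _ _

theorem pv_isIn_len_eq {s t : String} (h : PySem.Str.isIn s t = true)
    (hl : PySem.Str.len t ≤ PySem.Str.len s) : s = t := by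
  have hinf := (PySem.Str.isIn_iff_infix s t).mp h
  have h1 := hinf.length_le
  have h2 := PySem.Str.len_eq s
  have h3 := PySem.Str.len_eq t
  have hlen : s.toList.length = t.toList.length := by omega
  exact String.toList_inj.mp (hinf.eq_of_length hlen)

-- the two predicates agree: strictly-shorter-and-contained = different-and-contained
theorem pv_P_iff (s t : String) : pvP s t = ((s != t) && PySem.Str.isIn s t) := by
  unfold pvP
  cases hin : PySem.Str.isIn s t
  · simp
  · simp only [Bool.and_true]
    by_cases hst : s = t
    · subst hst; simp
    · have hlt : PySem.Str.len s < PySem.Str.len t := by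
        by_contra hge
        exact hst (pv_isIn_len_eq hin (by omega))
      have h1 : decide (PySem.Str.len s < PySem.Str.len t) = true := decide_eq_true hlt
      have h2 : (s != t) = true := bne_iff_ne.mpr hst
      rw [h1, h2]

theorem pv_P_len {s t : String} (h : pvP s t = true) : PySem.Str.len s < PySem.Str.len t := by
  unfold pvP at h
  exact of_decide_eq_true (Bool.and_elim_left h)

-- outer loop of A, peeled into the structural recursion pvFlatA
theorem pv_portA_loop (full : List String) :
    ∀ (suf : List String) (k : Nat), full.drop k = suf → ∀ (st : PySem.Set String),
      (PySem.List.enumerate suf (k : Int)).foldl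
        (fun suppressed p =>
          (PySem.List.slice full (some (p.1 + 1)) none).foldl
            (fun suppressed short_kw =>
              if (short_kw != p.2) && PySem.Str.isIn short_kw p.2 then PySem.Set.add suppressed short_kw
              else suppressed)
            suppressed)
        st = PySem.Set.update st (pvFlatA suf) := by
  intro suf
  induction suf with
  | nil =>
    intro k hk st
    simp [PySem.List.enumerate_nil, pvFlatA, PySem.Set.update]
  | cons t rest ih =>
    intro k hk st
    have hdrop : full.drop (k + 1) = rest := by
      rw [← List.tail_drop, hk]
      rfl
    have hsl : PySem.List.slice full (some ((k : Int) + 1)) none = rest := by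
      have hcast : ((k : Int) + 1) = ((k + 1 : Nat) : Int) := by push_cast; ring
      rw [hcast, PySem.List.slice_from_natCast, hdrop]
    rw [PySem.List.enumerate_cons, List.foldl_cons]
    have hk1 : ((k : Int) + 1) = ((k + 1 : Nat) : Int) := by push_cast; ring
    rw [hsl, pv_foldl_if_add, hk1, ih (k + 1) hdrop]
    rw [pvFlatA, PySem.Set.update_append]

-- B's inner loop: snapshot iteration = remove the hits from the worklist, update the set
theorem pv_inner (t : String) :
    ∀ (l : List String) (r : List String) (S : PySem.Set String),
      l.foldl
        (fun (st2 : List String × PySem.Set String) s =>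
          if decide (PySem.Str.len s < PySem.Str.len t) && PySem.Str.isIn s t then
            (st2.1.filter (fun x => x != s), PySem.Set.add st2.2 s)
          else st2)
        (r, S)
      = ((l.filter (fun s => pvP s t)).foldl (fun r s => r.filter (fun x => x != s)) r,
         PySem.Set.update S (l.filter (fun s => pvP s t))) := by
  intro l
  induction l with
  | nil => intro r S; rfl
  | cons x l ih =>
    intro r S
    rw [List.foldl_cons]
    cases h : pvP x t
    · have h' : (decide (PySem.Str.len x < PySem.Str.len t) && PySem.Str.isIn x t) = false := h
      rw [if_neg (by simp only [h']; exact Bool.false_ne_true),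
        List.filter_cons_of_neg (by simp only [h]; exact Bool.false_ne_true), ih]
    · have h' : (decide (PySem.Str.len x < PySem.Str.len t) && PySem.Str.isIn x t) = true := h
      rw [if_pos h', List.filter_cons_of_pos (by exact h), ih,
        List.foldl_cons, PySem.Set.update_cons]

-- folding deletions over a list of keys = one filter by non-membership
theorem pv_filter_chain :
    ∀ (l r : List String),
      l.foldl (fun r s => r.filter (fun x => x != s)) r = r.filter (fun x => !(l.contains x)) := by
  intro l
  induction l with
  | nil => intro r; simp
  | cons s l ih =>
    intro r
    rw [List.foldl_cons, ih, List.filter_filter]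
    apply List.filter_congr
    intro x _
    by_cases hxs : x = s <;> simp [hxs, Bool.and_comm]

-- B's port, peeled into pvOuter
theorem pv_portB_loop :
    ∀ (L' : List String) (R : List String) (S : PySem.Set String),
      L'.foldl
        (fun (st : List String × PySem.Set String) t =>
          st.1.foldl
            (fun (st2 : List String × PySem.Set String) s =>
              if decide (PySem.Str.len s < PySem.Str.len t) && PySem.Str.isIn s t then
                (st2.1.filter (fun x => x != s), PySem.Set.add st2.2 s)
              else st2)
            st)
        (R, S)
      = (pvRem L' R, pvOuter L' R S) := by
  intro L'
  induction L' with
  | nil => intro R S; rfl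
  | cons t M ih =>
    intro R S
    rw [List.foldl_cons, pv_inner, pv_filter_chain]
    have hR : R.filter (fun x => !((R.filter (fun s => pvP s t)).contains x))
        = R.filter (fun s => !(pvP s t)) := by
      apply List.filter_congr
      intro x hx
      by_cases h : pvP x t = true
      · simp [List.mem_filter, hx, h]
      · simp only [Bool.not_eq_true] at h
        simp [List.mem_filter, h]
    rw [hR, ih, pvRem, pvOuter]

-- candidates strictly shorter than t all live past the processed prefix and past t itself
theorem pv_prefix (t : String) (g : String → Bool) (pre M : List String)
    (hpre : ∀ p ∈ pre, PySem.Str.len t ≤ PySem.Str.len p) :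
    (PySem.Set.ofList (pre ++ t :: M)).filter (fun s => pvP s t && g s)
      = (PySem.Set.ofList M).filter (fun s => pvP s t && g s) := by
  rw [PySem.Set.ofList_append, PySem.Set.update_eq_append_filter, List.filter_append]
  have h1 : (PySem.Set.ofList pre).filter (fun s => pvP s t && g s) = [] := by
    rw [List.filter_eq_nil_iff]
    intro s hs hcontra
    have hmem : s ∈ pre := (PySem.Set.mem_ofList _ _).mp hs
    have hP : pvP s t = true := by
      cases hP : pvP s t
      · rw [hP] at hcontra; simp at hcontra
      · rfl
    have hlen := pv_P_len hP
    have := hpre s hmem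
    omega
  rw [h1, List.nil_append, List.filter_filter, pv_ofList_cons,
    List.filter_cons_of_neg (by simp [pvP]), List.filter_filter]
  apply List.filter_congr
  intro s hs
  cases hP : pvP s t
  · simp
  · have hlen := pv_P_len hP
    have hnt : (s != t) = true := by
      have hne : s ≠ t := by intro he; subst he; omega
      simp [bne, hne]
    have hspre : s ∉ pre := by
      intro hsp
      have := hpre s hsp
      omega
    simp [hnt, hspre]

-- the central lemma: A's dedup-on-emission equals B's worklist recursion
theorem pv_main :
    ∀ (L' pre : List String) (S : PySem.Set String),
      (pre ++ L').Pairwise (fun a b => PySem.Str.len b ≤ PySem.Str.len a) →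
      PySem.Set.update S (pvFlatA L')
        = pvOuter L' ((PySem.Set.ofList (pre ++ L')).filter (fun s => !(PySem.Set.contains S s))) S := by
  intro L'
  induction L' with
  | nil =>
    intro pre S _
    simp [pvFlatA, pvOuter, PySem.Set.update_nil]
  | cons t M ih =>
    intro pre S h
    have hsplit := List.pairwise_append.mp h
    have hpre : ∀ p ∈ pre, PySem.Str.len t ≤ PySem.Str.len p :=
      fun p hp => hsplit.2.2 p hp t (by simp)
    rw [pvFlatA, PySem.Set.update_append, pvOuter]
    set R := (PySem.Set.ofList (pre ++ t :: M)).filter (fun s => !(PySem.Set.contains S s)) with hRdef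
    have hRnodup : R.Nodup := (PySem.Set.nodup_ofList _).filter _
    -- (i) the two suppressed sets after this container agree as lists
    have hi : PySem.Set.update S (M.filter (fun s => (s != t) && PySem.Str.isIn s t))
        = PySem.Set.update S (R.filter (fun s => pvP s t)) := by
      rw [PySem.Set.update_eq_append_filter, PySem.Set.update_eq_append_filter]
      congr 1
      have hML : PySem.Set.ofList (M.filter (fun s => (s != t) && PySem.Str.isIn s t))
          = (PySem.Set.ofList M).filter (fun s => (s != t) && PySem.Str.isIn s t) := by
        have := pv_dedup_filter (fun s => (s != t) && PySem.Str.isIn s t) M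
        simpa using this
      have hRd : PySem.Set.ofList (R.filter (fun s => pvP s t)) = R.filter (fun s => pvP s t) :=
        PySem.Set.ofList_eq_self_of_nodup _ (hRnodup.filter _)
      rw [hML, hRd, hRdef, List.filter_filter, List.filter_filter, List.filter_filter]
      have e1 : ∀ N : List String, N.filter (fun a => !(PySem.Set.contains S a) && ((a != t) && PySem.Str.isIn a t))
          = N.filter (fun s => pvP s t && !(PySem.Set.contains S s)) := by
        intro N
        apply List.filter_congr
        intro s _
        rw [pv_P_iff]
        cases (PySem.Set.contains S s) <;> cases ((s != t) && PySem.Str.isIn s t) <;> rfl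
      have e2 : (PySem.Set.ofList (pre ++ t :: M)).filter
            (fun a => !(PySem.Set.contains S a) && pvP a t && !(PySem.Set.contains S a))
          = (PySem.Set.ofList (pre ++ t :: M)).filter (fun s => pvP s t && !(PySem.Set.contains S s)) := by
        apply List.filter_congr
        intro s _
        rw [pv_P_iff]
        cases (PySem.Set.contains S s) <;> cases ((s != t) && PySem.Str.isIn s t) <;> rfl
      rw [e1, e2, pv_prefix t (fun s => !(PySem.Set.contains S s)) pre M hpre]
    -- (ii) the new worklist is the filtered dedup against the new suppressed set
    have hii : R.filter (fun s => !(pvP s t))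
        = (PySem.Set.ofList ((pre ++ [t]) ++ M)).filter
            (fun s => !(PySem.Set.contains (PySem.Set.update S (R.filter (fun s => pvP s t))) s)) := by
      have hX : (pre ++ [t]) ++ M = pre ++ t :: M := by
        rw [List.append_assoc, List.singleton_append]
      rw [hX, hRdef, List.filter_filter]
      apply List.filter_congr
      intro s hs
      cases hc : PySem.Set.contains S s
      · have hcS : s ∉ S := by
          intro hmem
          rw [(PySem.Set.contains_iff S s).mpr hmem] at hc
          exact Bool.false_ne_true hc.symm
        have hsR : s ∈ R := by
          rw [hRdef]
          exact List.mem_filter.mpr ⟨hs, by rw [hc]; rfl⟩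
        cases hP : pvP s t
        · have hnotin : s ∉ PySem.Set.update S (R.filter (fun s => pvP s t)) := by
            intro hmem
            rcases (PySem.Set.mem_update _ _ _).mp hmem with hin | hin
            · exact hcS hin
            · have := (List.mem_filter.mp hin).2
              rw [hP] at this
              exact Bool.false_ne_true this
          have hb : PySem.Set.contains (PySem.Set.update S (R.filter (fun s => pvP s t))) s = false := by
            cases hb' : PySem.Set.contains (PySem.Set.update S (R.filter (fun s => pvP s t))) s
            · rfl
            · exact absurd ((PySem.Set.contains_iff _ _).mp hb') hnotin
          rw [hb]
          simp
        · have hin : s ∈ PySem.Set.update S (R.filter (fun s => pvP s t)) :=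
            (PySem.Set.mem_update _ _ _).mpr (Or.inr (List.mem_filter.mpr ⟨hsR, hP⟩))
          have hb : PySem.Set.contains (PySem.Set.update S (R.filter (fun s => pvP s t))) s = true :=
            (PySem.Set.contains_iff _ _).mpr hin
          rw [hb]
          simp
      · have hb : PySem.Set.contains (PySem.Set.update S (R.filter (fun s => pvP s t))) s = true :=
          (PySem.Set.contains_iff _ _).mpr
            ((PySem.Set.mem_update _ _ _).mpr (Or.inl ((PySem.Set.contains_iff S s).mp hc)))
        rw [hb]
        simp
    rw [hi, hii]
    exact ih (pre ++ [t]) _ (by rwa [List.append_assoc, List.singleton_append])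

-- ===== VERDICT (by name: the statement is the Claim_ definition above) =====
theorem build_containment_filter_py_spec : Claim_equal_build_containment_filter_py := by
  intro kws _hdom
  show build_containment_filter_py kws = build_containment_filter_py_alt kws
  have hA : build_containment_filter_py kws
      = PySem.Set.update PySem.Set.empty
          (pvFlatA (PySem.List.sorted kws (fun s => PySem.Str.len s) true)) := by
    have h := pv_portA_loop (PySem.List.sorted kws (fun s => PySem.Str.len s) true)
      (PySem.List.sorted kws (fun s => PySem.Str.len s) true) 0 (by simp) PySem.Set.empty
    rw [Nat.cast_zero] at h
    exact h
  have hB : build_containment_filter_py_alt kws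
      = pvOuter (PySem.List.sorted kws (fun s => PySem.Str.len s) true)
          (PySem.List.dedup (PySem.List.sorted kws (fun s => PySem.Str.len s) true))
          PySem.Set.empty := by
    show (_ : List String × PySem.Set String).2 = _
    rw [pv_portB_loop]
  rw [hA, hB]
  have hmain := pv_main (PySem.List.sorted kws (fun s => PySem.Str.len s) true) [] PySem.Set.empty
    (by simpa using PySem.List.sorted_pairwise_rev kws (fun s => PySem.Str.len s))
  rw [hmain]
  congr 1
  rw [List.nil_append, PySem.List.dedup_eq_ofList]
  simp [PySem.Set.contains, PySem.Set.empty]
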